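-- pv_equiv track=rewrite | github.com/Lenoush/Travel_Order_Desorder | src/data_process/utils/utils.py | check_label
-- ===== SOURCE A (Python) =====
-- def check_label(predict):
--     """
--     Check if the label of the entity is a city
--     """
--     erreur = []
--     count_depart = 0
--     count_arrival = 0
--     count_correspondance = 0
--     for entity in predict:
--         if entity["label"] == "DEPART":
--             count_depart += 1
--         elif entity["label"] == "ARRIVEE":
--             count_arrival += 1
--         elif entity["label"] == "CORRESPONDANCE":
--             count_correspondance += 1
--
--     if count_depart == 0 and count_arrival == 0:
--         erreur.append("NOT_TRIP")
--         return predict, erreur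
--
--     if count_depart == 0 :
--         erreur.append("NOT_TRIP : No departure")
--     if count_arrival == 0 :
--         erreur.append("NOT_TRIP : No arrival ")
--
--     return predict, erreur
-- ===== SOURCE B (Python) =====
-- def check_label(predict):
--     """
--     Check if the label of the entity is a city
--     """
--     checks = [("DEPART", "NOT_TRIP : No departure"),
--               ("ARRIVEE", "NOT_TRIP : No arrival ")]
--     erreur = [msg for lab, msg in checks
--               if not any(entity["label"] == lab for entity in predict)]
--     if len(erreur) == 2:
--         erreur = ["NOT_TRIP"]
--     return predict, erreur
-- ===== Notes on version B (the rewrite author's own statement) =====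
-- stated objective: simpler
-- what changed: Table-driven rewrite: a list of (required label, error message) pairs is filtered by a short-circuiting any-scan per requirement, the two-message case collapses to ['NOT_TRIP']; A's three running counters, elif chain and branch cascade disappear.
import Mathlib
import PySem

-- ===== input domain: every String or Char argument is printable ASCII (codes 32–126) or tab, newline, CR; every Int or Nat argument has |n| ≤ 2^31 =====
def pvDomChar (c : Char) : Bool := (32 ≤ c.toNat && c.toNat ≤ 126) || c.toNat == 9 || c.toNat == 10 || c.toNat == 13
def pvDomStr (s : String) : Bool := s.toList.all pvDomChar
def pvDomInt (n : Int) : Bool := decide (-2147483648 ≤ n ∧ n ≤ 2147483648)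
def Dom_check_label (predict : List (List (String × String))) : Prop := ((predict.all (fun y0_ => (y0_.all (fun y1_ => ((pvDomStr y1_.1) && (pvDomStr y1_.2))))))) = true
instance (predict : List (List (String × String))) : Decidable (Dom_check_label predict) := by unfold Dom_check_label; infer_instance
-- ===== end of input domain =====

-- B replaces A's three counters and branch cascade by a table of (label, message) pairs filtered by short-circuit scans (simpler; same cost).

-- ===== PORT A =====
-- entity["label"]: first-match dict lookup; total form getD is exact under Pre_ (key present)
def pvLabel (entity : List (String × String)) : String :=
  (PySem.Dict.mk entity).getD "label" ""

def check_label (predict : List (List (String × String))) : (List (List (String × String))) × List String :=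
  let counts : Int × Int × Int := predict.foldl (fun c entity =>
    if pvLabel entity = "DEPART" then (c.1 + 1, c.2.1, c.2.2)
    else if pvLabel entity = "ARRIVEE" then (c.1, c.2.1 + 1, c.2.2)
    else if pvLabel entity = "CORRESPONDANCE" then (c.1, c.2.1, c.2.2 + 1)
    else c) (0, 0, 0)
  if counts.1 = 0 ∧ counts.2.1 = 0 then (predict, ["NOT_TRIP"])
  else (predict,
    (if counts.1 = 0 then ["NOT_TRIP : No departure"] else []) ++
    (if counts.2.1 = 0 then ["NOT_TRIP : No arrival "] else []))

-- ===== PORT B =====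
def check_label_alt (predict : List (List (String × String))) : (List (List (String × String))) × List String :=
  let checks : List (String × String) :=
    [("DEPART", "NOT_TRIP : No departure"), ("ARRIVEE", "NOT_TRIP : No arrival ")]
  let erreur := (checks.filter (fun p => ! predict.any (fun entity => pvLabel entity == p.1))).map Prod.snd
  let erreur := if erreur.length = 2 then ["NOT_TRIP"] else erreur
  (predict, erreur)

-- ===== PRECONDITION & SPEC =====
-- Pre_ excludes exactly the inputs where some entity lacks a "label" key: there Python A raises KeyError (B too).
def Pre_check_label (predict : List (List (String × String))) : Prop :=
  (predict.all (fun e => ((PySem.Dict.mk e).get? "label").isSome)) = true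
instance (predict : List (List (String × String))) : Decidable (Pre_check_label predict) := by unfold Pre_check_label; infer_instance

def pvWitness_check_label : (List (List (String × String))) :=
  [[("label", "DEPART")], [("label", "X")]]

def Spec_check_label (predict : List (List (String × String))) (out : (List (List (String × String))) × List String) : Prop := out = check_label_alt predict
instance (predict : List (List (String × String))) (out : (List (List (String × String))) × List String) : Decidable (Spec_check_label predict out) := by unfold Spec_check_label; infer_instance

-- ===== CLAIM (what is proved, stated in full; the proofs are below) =====
def Claim_equal_check_label : Prop := ∀ (predict : List (List (String × String))), Dom_check_label predict → Pre_check_label predict → Spec_check_label predict (check_label predict)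

-- ===== LEMMAS AND PROOFS =====

-- A's fold adds the per-label occurrence counts to the accumulator
lemma check_label_fold (l : List (List (String × String))) (a b c : Int) :
    l.foldl (fun (c : Int × Int × Int) entity =>
      if pvLabel entity = "DEPART" then (c.1 + 1, c.2.1, c.2.2)
      else if pvLabel entity = "ARRIVEE" then (c.1, c.2.1 + 1, c.2.2)
      else if pvLabel entity = "CORRESPONDANCE" then (c.1, c.2.1, c.2.2 + 1)
      else c) (a, b, c)
    = (a + ((l.map pvLabel).count "DEPART" : Int),
       b + ((l.map pvLabel).count "ARRIVEE" : Int),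
       c + ((l.map pvLabel).count "CORRESPONDANCE" : Int)) := by
  induction l generalizing a b c with
  | nil => simp
  | cons x xs ih =>
    simp only [List.foldl_cons, List.map_cons, List.count_cons]
    split_ifs with h1 h2 h3 <;>
      simp_all [beq_iff_eq, Prod.ext_iff] <;> omega

-- a count is zero exactly when B's short-circuit scan for that label fails
lemma count_zero_iff_any (l : List (List (String × String))) (s : String) :
    ((l.map pvLabel).count s = 0) ↔
      l.any (fun entity => pvLabel entity == s) = false := by
  rw [List.count_eq_zero, List.any_eq_false]
  simp only [List.mem_map, not_exists, not_and, beq_iff_eq]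

-- ===== VERDICT (by name: the statement is the Claim_ definition above) =====
theorem check_label_spec : Claim_equal_check_label := by
  intro predict _ _
  show check_label predict = check_label_alt predict
  unfold check_label check_label_alt
  simp only [check_label_fold, zero_add]
  by_cases hd : (predict.map pvLabel).count "DEPART" = 0 <;>
  by_cases ha : (predict.map pvLabel).count "ARRIVEE" = 0
  · have hd' := (count_zero_iff_any predict "DEPART").mp hd
    have ha' := (count_zero_iff_any predict "ARRIVEE").mp ha
    simp [hd, ha, hd', ha', List.filter]
  · have hd' := (count_zero_iff_any predict "DEPART").mp hd
    have ha' : predict.any (fun entity => pvLabel entity == "ARRIVEE") = true := by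
      cases h : predict.any (fun entity => pvLabel entity == "ARRIVEE")
      · exact absurd ((count_zero_iff_any predict "ARRIVEE").mpr h) ha
      · rfl
    simp [hd, ha, hd', ha', List.filter]
  · have ha' := (count_zero_iff_any predict "ARRIVEE").mp ha
    have hd' : predict.any (fun entity => pvLabel entity == "DEPART") = true := by
      cases h : predict.any (fun entity => pvLabel entity == "DEPART")
      · exact absurd ((count_zero_iff_any predict "DEPART").mpr h) hd
      · rfl
    simp [hd, ha, hd', ha', List.filter]
  · have hd' : predict.any (fun entity => pvLabel entity == "DEPART") = true := by
      cases h : predict.any (fun entity => pvLabel entity == "DEPART")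
      · exact absurd ((count_zero_iff_any predict "DEPART").mpr h) hd
      · rfl
    have ha' : predict.any (fun entity => pvLabel entity == "ARRIVEE") = true := by
      cases h : predict.any (fun entity => pvLabel entity == "ARRIVEE")
      · exact absurd ((count_zero_iff_any predict "ARRIVEE").mpr h) ha
      · rfl
    simp [hd, ha, hd', ha', List.filter]
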